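-- pv_equiv track=rewrite | github.com/IntSPstudio/vslst-python | VSLstAL.py | getArrayWidth
-- ===== SOURCE A (Python) =====
-- fileSeparator =";"
--
-- def getArrayWidth(array):
-- 	arrayMaxWidth =0
-- 	arrayHeight = len(array)
-- 	for yp in range(0, arrayHeight):
-- 		arrayWidth = len(array[yp])
-- 		pointWidth =0
-- 		pointCheck =0
-- 		for xp in range(0, arrayWidth):
-- 			point = str(array[yp][xp])
-- 			if point == fileSeparator:
-- 				pointCheck =0
-- 			else:
-- 				if pointCheck == 0:
-- 					pointWidth +=1
-- 					pointCheck =1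
-- 		if pointWidth > arrayMaxWidth:
-- 			arrayMaxWidth = pointWidth
-- 	return arrayMaxWidth
-- ===== SOURCE B (Python) =====
-- fileSeparator = ";"
--
-- def getArrayWidth(array):
--     # Boundary approach: collect the indices of the separator cells (plus virtual
--     # cuts at -1 and len(row)); a non-separator run exists exactly between two
--     # consecutive cuts that are more than 1 apart, so count those gaps.
--     def rowWidth(row):
--         cuts = [-1] + [i for i, p in enumerate(row) if str(p) == fileSeparator] + [len(row)]
--         return sum(1 for a, b in zip(cuts, cuts[1:]) if b - a > 1)
--     return max((rowWidth(row) for row in array), default=0)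
-- ===== Notes on version B (the rewrite author's own statement) =====
-- stated objective: alternative
-- what changed: Replaced A's per-cell pointWidth/pointCheck state machine with a boundary-index algorithm: per row, collect the separator positions (with virtual cuts at -1 and len(row)) and count consecutive cut pairs more than 1 apart; take the max over rows with default 0.
import Mathlib
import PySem

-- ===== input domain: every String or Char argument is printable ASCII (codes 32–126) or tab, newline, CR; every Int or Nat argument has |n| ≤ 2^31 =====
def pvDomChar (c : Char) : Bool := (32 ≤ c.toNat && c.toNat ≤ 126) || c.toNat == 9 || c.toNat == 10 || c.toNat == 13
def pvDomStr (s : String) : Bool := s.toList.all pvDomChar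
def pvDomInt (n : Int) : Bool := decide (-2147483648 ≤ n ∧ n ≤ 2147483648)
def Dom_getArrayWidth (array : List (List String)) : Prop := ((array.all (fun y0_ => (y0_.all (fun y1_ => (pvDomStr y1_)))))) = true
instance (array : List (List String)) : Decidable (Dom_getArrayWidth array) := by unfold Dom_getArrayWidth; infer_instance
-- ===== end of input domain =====

-- B replaces A's pointWidth/pointCheck state machine with a boundary-index algorithm: per row, list the separator positions (with virtual cuts at -1 and len) and count consecutive cuts more than 1 apart (alternative decomposition, same cost).


-- ===== PORT A =====
def getArrayWidth (array : List (List String)) : Int :=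
  array.foldl (fun arrayMaxWidth row =>
    let st := row.foldl (fun (st : Int × Int) point =>
      if point = ";" then (st.1, 0)
      else if st.2 = 0 then (st.1 + 1, 1) else st) (0, 0)
    if st.1 > arrayMaxWidth then st.1 else arrayMaxWidth) 0

-- ===== PORT B =====
-- cuts = [-1] + [i for i,p in enumerate(row) if str(p) == ";"] + [len(row)]
def rowCuts (row : List String) : List Int :=
  [-1] ++ ((PySem.List.enumerate row 0).filter (fun p => p.2 = ";")).map (fun p => p.1)
       ++ [(row.length : Int)]

-- sum(1 for a, b in zip(cuts, cuts[1:]) if b - a > 1)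
def rowWidth (row : List String) : Int :=
  let cuts := rowCuts row
  (((cuts.zip (cuts.drop 1)).filter (fun ab => ab.2 - ab.1 > 1)).length : Int)

-- max(..., default=0)
def getArrayWidth_alt (array : List (List String)) : Int :=
  match PySem.List.max? (array.map rowWidth) (fun x => x) with
  | some m => m
  | none => 0

-- ===== PRECONDITION & SPEC =====
def Spec_getArrayWidth (array : List (List String)) (out : Int) : Prop := out = getArrayWidth_alt array
instance (array : List (List String)) (out : Int) : Decidable (Spec_getArrayWidth array out) := by unfold Spec_getArrayWidth; infer_instance

-- ===== CLAIM (what is proved, stated in full; the proofs are below) =====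
def Claim_equal_getArrayWidth : Prop := ∀ (array : List (List String)), Dom_getArrayWidth array → Spec_getArrayWidth array (getArrayWidth array)

-- ===== LEMMAS AND PROOFS =====

-- common spec: number of maximal runs of non-";" elements
mutual
def countRuns : List String → Int
  | [] => 0
  | x :: xs => if x = ";" then countRuns xs else 1 + inRun xs
def inRun : List String → Int
  | [] => 0
  | x :: xs => if x = ";" then countRuns xs else inRun xs
end

-- gap-count state machine: d = distance from the last cut to the scan position
def gfun : List String → Int → Int
  | [], d => if d > 1 then 1 else 0
  | x :: xs, d => if x = ";" then (if d > 1 then 1 else 0) + gfun xs 1 else gfun xs (d + 1)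

def gapcount (l : List Int) : Int :=
  (((l.zip (l.drop 1)).filter (fun ab => ab.2 - ab.1 > 1)).length : Int)

lemma gapcount_cons (a b : Int) (t : List Int) :
    gapcount (a :: b :: t) = (if b - a > 1 then 1 else 0) + gapcount (b :: t) := by
  simp only [gapcount, List.drop_succ_cons, List.drop_zero, List.zip_cons_cons, List.filter_cons]
  by_cases h : b - a > 1
  · simp only [h, decide_true, if_true, List.length_cons]
    push_cast; ring
  · simp only [h, decide_false, if_false]
    push_cast
    ring

lemma inner_fold (xs : List String) : ∀ w : Int,
    (xs.foldl (fun (st : Int × Int) point =>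
      if point = ";" then (st.1, 0)
      else if st.2 = 0 then (st.1 + 1, 1) else st) (w, 0)).1 = w + countRuns xs
  ∧ (xs.foldl (fun (st : Int × Int) point =>
      if point = ";" then (st.1, 0)
      else if st.2 = 0 then (st.1 + 1, 1) else st) (w, 1)).1 = w + inRun xs := by
  induction xs with
  | nil => intro w; simp [countRuns, inRun]
  | cons x xs ih =>
    intro w
    by_cases hx : x = ";"
    · simp [List.foldl_cons, hx, countRuns, inRun, (ih w).1]
    · constructor
      · simp [List.foldl_cons, hx, countRuns, (ih (w+1)).2]; ring
      · simp [List.foldl_cons, hx, inRun, (ih w).2]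

lemma countRuns_nonneg (xs : List String) : 0 ≤ countRuns xs ∧ 0 ≤ inRun xs := by
  induction xs with
  | nil => simp [countRuns, inRun]
  | cons x xs ih =>
    by_cases hx : x = ";" <;> constructor <;> simp [countRuns, inRun, hx] <;> omega

lemma gfun_spec (xs : List String) :
    gfun xs 1 = countRuns xs ∧ ∀ d : Int, 2 ≤ d → gfun xs d = 1 + inRun xs := by
  induction xs with
  | nil =>
    constructor
    · simp [gfun, countRuns]
    · intro d hd; simp [gfun, inRun]; omega
  | cons x xs ih =>
    by_cases hx : x = ";"
    · constructor
      · simp [gfun, countRuns, hx, ih.1]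
      · intro d hd
        have : d > 1 := by omega
        simp [gfun, inRun, hx, ih.1, this]
    · constructor
      · simpa [gfun, countRuns, hx] using ih.2 2 (by omega)
      · intro d hd
        simpa [gfun, inRun, hx] using ih.2 (d + 1) (by omega)

-- the cut list built from enumerate, scanning from position n
lemma cuts_gap (xs : List String) : ∀ (n c : Int), c < n →
    gapcount (c :: (((PySem.List.enumerate xs n).filter (fun p => p.2 = ";")).map (fun p => p.1)
      ++ [n + xs.length])) = gfun xs (n - c) := by
  induction xs with
  | nil =>
    intro n c hc
    simp only [PySem.List.enumerate_nil, List.filter_nil, List.map_nil, List.nil_append,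
      List.length_nil, Nat.cast_zero, add_zero]
    by_cases h : n - c > 1 <;> simp [gapcount, gfun, h]
  | cons x xs ih =>
    intro n c hc
    rw [PySem.List.enumerate_cons]
    simp only [List.filter_cons, List.length_cons]
    push_cast
    by_cases hx : x = ";"
    · simp only [hx, decide_true, if_true, List.map_cons, List.cons_append]
      rw [show (n : Int) + (↑xs.length + 1) = (n + 1) + ↑xs.length from by ring]
      rw [gapcount_cons, ih (n + 1) n (by omega)]
      rw [show (n : Int) + 1 - n = 1 from by ring]
      simp [gfun]
    · simp only [hx, decide_false, Bool.false_eq_true, if_false]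
      rw [show (n : Int) + (↑xs.length + 1) = (n + 1) + ↑xs.length from by ring]
      rw [ih (n + 1) c (by omega)]
      rw [show (n : Int) + 1 - c = (n - c) + 1 from by ring]
      simp [gfun, hx]

lemma rowWidth_eq (row : List String) : rowWidth row = countRuns row := by
  have h := cuts_gap row 0 (-1) (by omega)
  norm_num at h
  rw [(gfun_spec row).1] at h
  simp only [rowWidth, rowCuts, List.cons_append, List.nil_append]
  exact h

lemma outer_fold (array : List (List String)) : ∀ m : Int,
    array.foldl (fun arrayMaxWidth row =>
      let st := row.foldl (fun (st : Int × Int) point =>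
        if point = ";" then (st.1, 0)
        else if st.2 = 0 then (st.1 + 1, 1) else st) (0, 0)
      if st.1 > arrayMaxWidth then st.1 else arrayMaxWidth) m
    = (array.map countRuns).foldl max m := by
  induction array with
  | nil => intro m; simp
  | cons row rows ih =>
    intro m
    have h := (inner_fold row 0).1
    simp only [List.foldl_cons, List.map_cons]
    rw [ih]
    congr 1
    rw [h]
    simp only [zero_add]
    rcases lt_or_ge m (countRuns row) with h1 | h1
    · simp [h1, max_eq_right h1.le]
    · simp [not_lt.mpr h1, max_eq_left h1]

-- ===== VERDICT (by name: the statement is the Claim_ definition above) =====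
theorem getArrayWidth_spec : Claim_equal_getArrayWidth := by
  intro array _
  unfold Spec_getArrayWidth getArrayWidth getArrayWidth_alt
  rw [outer_fold array 0]
  have hmap : array.map rowWidth = array.map countRuns := by
    simp [rowWidth_eq]
  rw [hmap]
  cases harr : array.map countRuns with
  | nil => simp [PySem.List.max?]
  | cons x t =>
    rw [PySem.List.max?_id_cons]
    have hx : 0 ≤ x := by
      have : x ∈ array.map countRuns := by rw [harr]; exact List.mem_cons_self
      rcases List.mem_map.mp this with ⟨r, _, hr⟩
      exact hr ▸ (countRuns_nonneg r).1
    simp [List.foldl_cons, max_eq_right hx]
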